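-- pv_equiv track=rewrite | github.com/jasonwoodland/ohlfs-font-extras | make_bold.py | grid_to_runs
-- ===== SOURCE A (Python) =====
-- def grid_to_runs(grid: dict[tuple[int, int], bool]) -> list[tuple[int, int, int]]:
--     """Merge filled pixels into horizontal runs per row.
--
--     Returns list of (col_start, col_end_exclusive, row).
--     """
--     if not grid:
--         return []
--     rows: dict[int, list[int]] = {}
--     for (col, row) in grid:
--         rows.setdefault(row, []).append(col)
--     runs: list[tuple[int, int, int]] = []
--     for row, cols in rows.items():
--         cols.sort()
--         run_start = cols[0]
--         prev = cols[0]
--         for c in cols[1:]: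
--             if c == prev + 1:
--                 prev = c
--             else:
--                 runs.append((run_start, prev + 1, row))
--                 run_start = c
--                 prev = c
--         runs.append((run_start, prev + 1, row))
--     return runs
-- ===== SOURCE B (Python) =====
-- def grid_to_runs(grid: dict[tuple[int, int], bool]) -> list[tuple[int, int, int]]:
--     """Merge filled pixels into horizontal runs per row.
--
--     Returns list of (col_start, col_end_exclusive, row).
--     """
--     rows: dict[int, set[int]] = {}
--     for (col, row) in grid:
--         rows.setdefault(row, set()).add(col)
--     runs: list[tuple[int, int, int]] = []
--     for row, cols in rows.items():
--         for start in sorted(c for c in cols if c - 1 not in cols):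
--             end = start + 1
--             while end in cols:
--                 end += 1
--             runs.append((start, end, row))
--     return runs
-- ===== Notes on version B (the rewrite author's own statement) =====
-- stated objective: alternative
-- what changed: B groups each row's columns into a set instead of a list and emits runs by detecting run starts via membership (c-1 not in the set), walking each run's end upward by membership, sorting only the run starts, instead of A's sort of all columns followed by a consecutive-difference merge loop.
import Mathlib
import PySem

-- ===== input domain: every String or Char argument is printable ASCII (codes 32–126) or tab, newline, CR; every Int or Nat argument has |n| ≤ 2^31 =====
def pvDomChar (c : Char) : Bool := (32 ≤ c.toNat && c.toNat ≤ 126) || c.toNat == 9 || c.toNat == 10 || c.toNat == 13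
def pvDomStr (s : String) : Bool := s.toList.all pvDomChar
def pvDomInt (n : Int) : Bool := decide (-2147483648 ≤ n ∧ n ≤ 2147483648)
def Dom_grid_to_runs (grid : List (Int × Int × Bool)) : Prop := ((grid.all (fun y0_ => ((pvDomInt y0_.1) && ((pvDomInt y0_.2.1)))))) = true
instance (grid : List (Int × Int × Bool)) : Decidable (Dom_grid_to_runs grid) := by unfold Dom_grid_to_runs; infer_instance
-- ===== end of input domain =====

-- B replaces A's sort-all-columns-then-diff merge by a per-row column SET: run starts are the
-- columns c with c-1 absent; each run's end is found by walking membership upward; only the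
-- run starts are sorted (objective: alternative).


-- ===== PORT A =====
-- A's inner merge loop, for one (row, cols) item of the grouping dict
def pvMergeRow (runs : List (Int × Int × Int)) (rc : Int × List Int) : List (Int × Int × Int) :=
  match PySem.List.sorted rc.2 (fun x => x) false with
  | [] => runs            -- unreachable: every value list in the dict is nonempty
  | c0 :: rest =>
    let st := rest.foldl
      (fun (st : List (Int × Int × Int) × Int × Int) c =>
        if c = st.2.2 + 1 then (st.1, st.2.1, c)
        else (st.1 ++ [(st.2.1, st.2.2 + 1, rc.1)], c, c))
      (runs, c0, c0)
    st.1 ++ [(st.2.1, st.2.2 + 1, rc.1)]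

def grid_to_runs (grid : List (Int × Int × Bool)) : List (Int × Int × Int) :=
  if grid = [] then []
  else
    let rows : PySem.Dict Int (List Int) :=
      grid.foldl (fun d p => d.modify p.2.1 [] (fun cs => cs ++ [p.1])) PySem.Dict.empty
    rows.items.foldl pvMergeRow []

-- ===== PORT B =====
-- Source B's `while end in cols: end += 1`, fueled: fuel `cols.length + 1` always suffices (a run of
-- consecutive members of the duplicate-free set cols is at most cols.length long); each step is
-- exactly one iteration of the Python while loop
def pvRunEnd (cols : PySem.Set Int) : Nat → Int → Int
  | 0, e => e
  | fuel + 1, e => if PySem.Set.contains cols e then pvRunEnd cols fuel (e + 1) else e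

-- B's inner emission loop, for one (row, cols) item of the grouping dict
def pvScanRow (runs : List (Int × Int × Int)) (rc : Int × PySem.Set Int) : List (Int × Int × Int) :=
  let starts := PySem.List.sorted (rc.2.filter (fun c => !(PySem.Set.contains rc.2 (c - 1)))) (fun x => x) false
  starts.foldl (fun acc s => acc ++ [(s, pvRunEnd rc.2 (rc.2.length + 1) (s + 1), rc.1)]) runs

def grid_to_runs_alt (grid : List (Int × Int × Bool)) : List (Int × Int × Int) :=
  let rows : PySem.Dict Int (PySem.Set Int) :=
    grid.foldl (fun d p => d.modify p.2.1 PySem.Set.empty (fun s => PySem.Set.add s p.1)) PySem.Dict.empty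
  rows.items.foldl pvScanRow []

-- ===== PRECONDITION & SPEC =====
-- Pre_ excludes only association lists with a duplicated (col, row) key: the Python argument is a
-- dict, whose keys are necessarily distinct, so no actual Python input is excluded.
def Pre_grid_to_runs (grid : List (Int × Int × Bool)) : Prop :=
  (grid.map (fun p => (p.1, p.2.1))).Nodup
instance (grid : List (Int × Int × Bool)) : Decidable (Pre_grid_to_runs grid) := by unfold Pre_grid_to_runs; infer_instance

def pvWitness_grid_to_runs : (List (Int × Int × Bool)) :=
  [(0, 0, true), (1, 0, true), (3, 0, false), (0, 1, true)]

def Spec_grid_to_runs (grid : List (Int × Int × Bool)) (out : List (Int × Int × Int)) : Prop := out = grid_to_runs_alt grid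
instance (grid : List (Int × Int × Bool)) (out : List (Int × Int × Int)) : Decidable (Spec_grid_to_runs grid out) := by unfold Spec_grid_to_runs; infer_instance

-- ===== CLAIM (what is proved, stated in full; the proofs are below) =====
def Claim_equal_grid_to_runs : Prop := ∀ (grid : List (Int × Int × Bool)), Dom_grid_to_runs grid → Pre_grid_to_runs grid → Spec_grid_to_runs grid (grid_to_runs grid)

-- ===== LEMMAS AND PROOFS =====

-- canonical block decomposition of a sorted column list (proof device)
def pvGo (s p : Int) : List Int → List (Int × Int)
  | [] => [(s, p + 1)]
  | c :: rest => if c = p + 1 then pvGo s c rest else (s, p + 1) :: pvGo c c rest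

theorem pvMerge_eq_go (r : Int) : ∀ (rest : List Int) (runs : List (Int × Int × Int)) (s p : Int),
    (let st := rest.foldl
      (fun (st : List (Int × Int × Int) × Int × Int) c =>
        if c = st.2.2 + 1 then (st.1, st.2.1, c)
        else (st.1 ++ [(st.2.1, st.2.2 + 1, r)], c, c))
      (runs, s, p)
     st.1 ++ [(st.2.1, st.2.2 + 1, r)])
    = runs ++ (pvGo s p rest).map (fun q => (q.1, q.2, r)) := by
  intro rest
  induction rest with
  | nil => intro runs s p; simp [pvGo]
  | cons c rest ih =>
    intro runs s p
    simp only [List.foldl_cons, pvGo]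
    by_cases h : c = p + 1
    · simp only [if_pos h]
      exact ih runs s c
    · simp only [if_neg h]
      rw [ih (runs ++ [(s, p + 1, r)]) c c]
      simp

theorem go_starts : ∀ (rest u : List Int) (s p : Int),
    (u ++ p :: rest).Pairwise (· < ·) → s ≤ p →
    (∀ x, s ≤ x → x ≤ p → x ∈ u ++ p :: rest) →
    (pvGo s p rest).map Prod.fst = s :: rest.filter (fun c => !(decide ((c - 1) ∈ (u ++ p :: rest)))) := by
  intro rest
  induction rest with
  | nil => intro u s p _ _ _; simp [pvGo]
  | cons c rest ih =>
    intro u s p hpw hsp hcov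
    have hLeq : (u ++ [p]) ++ c :: rest = u ++ p :: c :: rest := by simp
    have hpc : p < c := by
      have := (List.pairwise_append.mp hpw).2.1
      exact (List.pairwise_cons.mp this).1 c (by simp)
    simp only [pvGo]
    by_cases h : c = p + 1
    · rw [if_pos h]
      have hmem : ((c - 1) ∈ (u ++ p :: c :: rest)) := by
        simp [h]
      rw [List.filter_cons_of_neg (by simp [hmem])]
      have := ih (u ++ [p]) s c (by rw [hLeq]; exact hpw) (by omega)
        (by intro x hx1 hx2; rw [hLeq]; by_cases hxp : x ≤ p
            · exact hcov x hx1 hxp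
            · have : x = c := by omega
              simp [this])
      rw [hLeq] at this
      exact this
    · rw [if_neg h]
      have hnm : ((c - 1) ∉ (u ++ p :: c :: rest)) := by
        intro hmem
        rcases List.mem_append.mp hmem with hu | hr
        · have : c - 1 < p := by
            have := (List.pairwise_append.mp hpw).2.2 _ hu p (by simp)
            omega
          omega
        · rcases List.mem_cons.mp hr with he | hr2
          · omega
          · rcases List.mem_cons.mp hr2 with he | hr3
            · omega
            · have hcc := (List.pairwise_append.mp hpw).2.1
              have := (List.pairwise_cons.mp ((List.pairwise_cons.mp hcc).2)).1 _ hr3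
              omega
      rw [List.filter_cons_of_pos (by simp [hnm])]
      have := ih (u ++ [p]) c c (by rw [hLeq]; exact hpw) (le_refl c)
        (by intro x hx1 hx2
            have : x = c := by omega
            simp [this])
      rw [hLeq] at this
      simp only [List.map_cons, this]

theorem go_blocks : ∀ (rest u : List Int) (s p : Int),
    (u ++ p :: rest).Pairwise (· < ·) → s ≤ p →
    (∀ x, s ≤ x → x ≤ p → x ∈ u ++ p :: rest) →
    ∀ q ∈ pvGo s p rest,
      q.1 < q.2 ∧ (∀ x, q.1 ≤ x → x < q.2 → x ∈ u ++ p :: rest) ∧ q.2 ∉ u ++ p :: rest := by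
  intro rest
  induction rest with
  | nil =>
    intro u s p hpw hsp hcov q hq
    simp [pvGo] at hq
    subst hq
    refine ⟨by omega, by intro x h1 h2; exact hcov x h1 (by omega), ?_⟩
    intro hmem
    rcases List.mem_append.mp hmem with hu | hr
    · have := (List.pairwise_append.mp hpw).2.2 _ hu p (by simp)
      omega
    · simp at hr
  | cons c rest ih =>
    intro u s p hpw hsp hcov q hq
    have hLeq : (u ++ [p]) ++ c :: rest = u ++ p :: c :: rest := by simp
    have hpc : p < c := by
      have := (List.pairwise_append.mp hpw).2.1
      exact (List.pairwise_cons.mp this).1 c (by simp)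
    simp only [pvGo] at hq
    by_cases h : c = p + 1
    · rw [if_pos h] at hq
      have := ih (u ++ [p]) s c (by rw [hLeq]; exact hpw) (by omega)
        (by intro x hx1 hx2; rw [hLeq]; by_cases hxp : x ≤ p
            · exact hcov x hx1 hxp
            · have : x = c := by omega
              simp [this]) q hq
      rw [hLeq] at this
      exact this
    · rw [if_neg h] at hq
      rcases List.mem_cons.mp hq with he | hq2
      · subst he
        refine ⟨by omega, by intro x h1 h2; exact hcov x h1 (by omega), ?_⟩
        intro hmem
        rcases List.mem_append.mp hmem with hu | hr
        · have := (List.pairwise_append.mp hpw).2.2 _ hu p (by simp)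
          omega
        · rcases List.mem_cons.mp hr with he | hr2
          · omega
          · rcases List.mem_cons.mp hr2 with he | hr3
            · omega
            · have hcc := (List.pairwise_append.mp hpw).2.1
              have := (List.pairwise_cons.mp ((List.pairwise_cons.mp hcc).2)).1 _ hr3
              omega
      · have := ih (u ++ [p]) c c (by rw [hLeq]; exact hpw) (le_refl c)
          (by intro x hx1 hx2
              have : x = c := by omega
              simp [this]) q hq2
        rw [hLeq] at this
        exact this

theorem pvRunEnd_spec (cols : PySem.Set Int) (e : Int) :
    ∀ (fuel : Nat) (t : Int), t ≤ e → (∀ x, t ≤ x → x < e → x ∈ cols) → e ∉ cols →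
    (e - t).toNat < fuel → pvRunEnd cols fuel t = e := by
  intro fuel
  induction fuel with
  | zero => intro t _ _ _ h; omega
  | succ f ih =>
    intro t ht hcov he hf
    by_cases hte : t = e
    · subst hte
      have hc : PySem.Set.contains cols t = false := by
        rw [Bool.eq_false_iff]
        intro hc
        rw [PySem.Set.contains_iff] at hc
        exact he hc
      show (if PySem.Set.contains cols t then pvRunEnd cols f (t + 1) else t) = t
      rw [hc]
      simp
    · have hc : PySem.Set.contains cols t = true := by
        rw [PySem.Set.contains_iff]
        exact hcov t le_rfl (by omega)
      show (if PySem.Set.contains cols t then pvRunEnd cols f (t + 1) else t) = e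
      rw [hc]
      simp only [if_pos]
      exact ih (t + 1) (by omega) (fun x h1 h2 => hcov x (by omega) h2) he (by omega)

theorem scanRow_eq_mergeRow (runs : List (Int × Int × Int)) (r : Int) (cs : List Int)
    (hnd : cs.Nodup) : pvScanRow runs (r, cs) = pvMergeRow runs (r, cs) := by
  have hperm : (PySem.List.sorted cs (fun x : Int => x) false).Perm cs := PySem.List.sorted_perm cs _ false
  have hmem : ∀ x, x ∈ PySem.List.sorted cs (fun x : Int => x) false ↔ x ∈ cs := fun x => hperm.mem_iff
  have hnd' : (PySem.List.sorted cs (fun x : Int => x) false).Nodup := hperm.nodup_iff.mpr hnd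
  have hle : (PySem.List.sorted cs (fun x : Int => x) false).Pairwise (· ≤ ·) :=
    PySem.List.sorted_pairwise cs (fun x => x)
  have hlt : (PySem.List.sorted cs (fun x : Int => x) false).Pairwise (· < ·) :=
    (hle.and hnd').imp (fun h => lt_of_le_of_ne h.1 h.2)
  -- the two filter predicates agree on cs
  have hfilt : cs.filter (fun c => !(PySem.Set.contains cs (c - 1)))
      = cs.filter (fun c => !(decide ((c - 1) ∈ PySem.List.sorted cs (fun x : Int => x) false))) := by
    apply List.filter_congr
    intro c _
    by_cases hm : (c - 1) ∈ cs
    · have h1 : PySem.Set.contains cs (c - 1) = true := by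
        rw [PySem.Set.contains_iff]; exact hm
      rw [h1]
      simp [hmem, hm]
    · have h1 : PySem.Set.contains cs (c - 1) = false := by
        rw [Bool.eq_false_iff]; intro h; rw [PySem.Set.contains_iff] at h; exact hm h
      rw [h1]
      simp [hmem, hm]
  rcases hsc : PySem.List.sorted cs (fun x : Int => x) false with _ | ⟨c0, rest⟩
  · -- cs = []
    have hcs : cs = [] := by
      have := hperm
      rw [hsc] at this
      exact this.symm.eq_nil
    subst hcs
    rfl
  · rw [hsc] at hperm hmem hnd' hle hlt hfilt
    have hcov0 : ∀ x, c0 ≤ x → x ≤ c0 → x ∈ [] ++ c0 :: rest := by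
      intro x h1 h2
      have : x = c0 := le_antisymm h2 h1
      simp [this]
    have hpw0 : ([] ++ c0 :: rest).Pairwise (· < ·) := by simpa using hlt
    -- B side
    unfold pvScanRow
    simp only []
    rw [hfilt]
    have hsorted : PySem.List.sorted
        (cs.filter (fun c => !(decide ((c - 1) ∈ (c0 :: rest))))) (fun x : Int => x) false
        = (c0 :: rest).filter (fun c => !(decide ((c - 1) ∈ (c0 :: rest)))) := by
      apply PySem.List.sorted_eq_of_perm_of_pairwise_lt
      · exact hperm.filter _
      · exact List.Pairwise.sublist List.filter_sublist hlt
    have hc0 : (c0 - 1) ∉ c0 :: rest := by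
      intro h
      rcases List.mem_cons.mp h with he | hr
      · omega
      · have := (List.pairwise_cons.mp hlt).1 _ hr
        omega
    have hstarts : (c0 :: rest).filter (fun c => !(decide ((c - 1) ∈ (c0 :: rest))))
        = (pvGo c0 c0 rest).map Prod.fst := by
      rw [go_starts rest [] c0 c0 hpw0 le_rfl hcov0]
      simp only [List.nil_append]
      rw [List.filter_cons_of_pos (by simp [hc0])]
      rfl
    rw [hsorted, hstarts]
    rw [PySem.List.foldl_append_singleton_eq_map]
    rw [List.map_map]
    -- A side
    have hA : pvMergeRow runs (r, cs) = runs ++ (pvGo c0 c0 rest).map (fun q => (q.1, q.2, r)) := by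
      unfold pvMergeRow
      rw [hsc]
      exact pvMerge_eq_go r rest runs c0 c0
    rw [hA]
    congr 1
    apply List.map_congr_left
    intro q hq
    obtain ⟨h1, h2, h3⟩ := go_blocks rest [] c0 c0 hpw0 le_rfl hcov0 q hq
    simp only [List.nil_append] at h2 h3
    have hsub : PySem.List.pyRange q.1 q.2 1 ⊆ c0 :: rest := by
      intro x hx
      rw [PySem.List.mem_pyRange_one] at hx
      exact h2 x hx.1 hx.2
    have hlenle : (PySem.List.pyRange q.1 q.2 1).length ≤ (c0 :: rest).length :=
      (List.subperm_of_subset (PySem.List.nodup_pyRange_one q.1 q.2) hsub).length_le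
    rw [PySem.List.length_pyRange_one] at hlenle
    have hlen : (c0 :: rest).length = cs.length := hperm.length_eq
    have hend : pvRunEnd cs (cs.length + 1) (q.1 + 1) = q.2 := by
      apply pvRunEnd_spec cs q.2 (cs.length + 1) (q.1 + 1) (by omega)
        (fun x hx1 hx2 => (hmem x).mp (h2 x (by omega) hx2))
        (fun hm => h3 ((hmem q.2).mpr hm))
        (by omega)
    simp only [Function.comp, hend]

theorem getD_foldl_modify_add (l : List (Int × Int)) : ∀ (d : PySem.Dict Int (PySem.Set Int)) (r : Int),
    ((l.foldl (fun d q => d.modify q.1 PySem.Set.empty (fun s => PySem.Set.add s q.2)) d).getD r PySem.Set.empty)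
    = PySem.Set.update (d.getD r PySem.Set.empty) ((l.filter (fun q => q.1 == r)).map (·.2)) := by
  induction l with
  | nil => intro d r; simp [PySem.Set.update]
  | cons q l ih =>
    intro d r
    simp only [List.foldl_cons]
    rw [ih]
    by_cases h : q.1 = r
    · rw [List.filter_cons_of_pos (by simp [h])]
      simp only [List.map_cons]
      rw [PySem.Set.update_cons]
      congr 1
      rw [h, PySem.Dict.getD_modify_self]
    · rw [List.filter_cons_of_neg (by simp [h])]
      congr 1
      rw [PySem.Dict.getD_modify_of_ne]
      exact fun hh => h hh.symm

theorem grid_to_runs_spec' (grid : List (Int × Int × Bool)) (hpre : Pre_grid_to_runs grid) :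
    grid_to_runs grid = grid_to_runs_alt grid := by
  by_cases hg : grid = []
  · subst hg; rfl
  unfold grid_to_runs grid_to_runs_alt
  rw [if_neg hg]
  simp only []
  have hA : grid.foldl (fun d p => d.modify p.2.1 [] (fun cs => cs ++ [p.1])) PySem.Dict.empty
      = (grid.map (fun p : Int × Int × Bool => (p.2.1, p.1))).foldl
          (fun d q => d.modify q.1 [] (fun cs => cs ++ [q.2])) PySem.Dict.empty :=
    (List.foldl_map (f := fun p : Int × Int × Bool => (p.2.1, p.1))
      (g := fun (d : PySem.Dict Int (List Int)) (q : Int × Int) => d.modify q.1 [] (fun cs => cs ++ [q.2]))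
      (l := grid) (init := PySem.Dict.empty)).symm
  have hB : grid.foldl (fun d p => d.modify p.2.1 PySem.Set.empty (fun s => PySem.Set.add s p.1)) PySem.Dict.empty
      = (grid.map (fun p : Int × Int × Bool => (p.2.1, p.1))).foldl
          (fun d q => d.modify q.1 PySem.Set.empty (fun s => PySem.Set.add s q.2)) PySem.Dict.empty :=
    (List.foldl_map (f := fun p : Int × Int × Bool => (p.2.1, p.1))
      (g := fun (d : PySem.Dict Int (PySem.Set Int)) (q : Int × Int) => d.modify q.1 PySem.Set.empty (fun s => PySem.Set.add s q.2))
      (l := grid) (init := PySem.Dict.empty)).symm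
  rw [hA, hB]
  have hkvnd : (grid.map (fun p : Int × Int × Bool => (p.2.1, p.1))).Nodup := by
    have h2 : grid.map (fun p : Int × Int × Bool => (p.2.1, p.1))
        = (grid.map (fun p => (p.1, p.2.1))).map Prod.swap := by
      rw [List.map_map]
      rfl
    rw [h2]
    exact hpre.map Prod.swap_injective
  have hcolsnd : ∀ r, (((grid.map (fun p : Int × Int × Bool => (p.2.1, p.1))).filter
      (fun q => q.1 == r)).map (·.2)).Nodup := by
    intro r
    apply List.Nodup.map_on
    · intro x hx y hy hxy
      have hx1 : x.1 = r := by simpa using (List.mem_filter.mp hx).2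
      have hy1 : y.1 = r := by simpa using (List.mem_filter.mp hy).2
      exact Prod.ext (hx1.trans hy1.symm) hxy
    · exact hkvnd.filter _
  have hndkA : ((grid.map (fun p : Int × Int × Bool => (p.2.1, p.1))).foldl
      (fun d q => d.modify q.1 [] (fun cs => cs ++ [q.2])) PySem.Dict.empty).keys.Nodup :=
    PySem.Dict.nodup_keys_foldl_modify_key _ _ _ _ _ PySem.Dict.nodup_keys_empty
  have hndkB : ((grid.map (fun p : Int × Int × Bool => (p.2.1, p.1))).foldl
      (fun d q => d.modify q.1 PySem.Set.empty (fun s => PySem.Set.add s q.2)) PySem.Dict.empty).keys.Nodup :=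
    PySem.Dict.nodup_keys_foldl_modify_key _ _ _ _ _ PySem.Dict.nodup_keys_empty
  have hkeys : ((grid.map (fun p : Int × Int × Bool => (p.2.1, p.1))).foldl
      (fun d q => d.modify q.1 [] (fun cs => cs ++ [q.2])) PySem.Dict.empty).keys
      = ((grid.map (fun p : Int × Int × Bool => (p.2.1, p.1))).foldl
      (fun d q => d.modify q.1 PySem.Set.empty (fun s => PySem.Set.add s q.2)) PySem.Dict.empty).keys := by
    rw [PySem.Dict.keys_foldl_modify_key, PySem.Dict.keys_foldl_modify_key]
  have hvalsA : ∀ k, ((grid.map (fun p : Int × Int × Bool => (p.2.1, p.1))).foldl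
      (fun d q => d.modify q.1 [] (fun cs => cs ++ [q.2])) PySem.Dict.empty).getD k []
      = ((grid.map (fun p : Int × Int × Bool => (p.2.1, p.1))).filter (fun q => q.1 == k)).map (·.2) := by
    intro k
    rw [PySem.Dict.getD_foldl_modify_append, PySem.Dict.getD_empty, List.nil_append]
  have hvals : ∀ k, ((grid.map (fun p : Int × Int × Bool => (p.2.1, p.1))).foldl
      (fun d q => d.modify q.1 PySem.Set.empty (fun s => PySem.Set.add s q.2)) PySem.Dict.empty).getD k PySem.Set.empty
      = ((grid.map (fun p : Int × Int × Bool => (p.2.1, p.1))).foldl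
      (fun d q => d.modify q.1 [] (fun cs => cs ++ [q.2])) PySem.Dict.empty).getD k [] := by
    intro k
    rw [getD_foldl_modify_add, PySem.Dict.getD_empty, hvalsA k, PySem.Set.update_empty]
    exact PySem.Set.ofList_eq_self_of_nodup _ (hcolsnd k)
  have hitems : ((grid.map (fun p : Int × Int × Bool => (p.2.1, p.1))).foldl
      (fun d q => d.modify q.1 [] (fun cs => cs ++ [q.2])) PySem.Dict.empty).items
      = ((grid.map (fun p : Int × Int × Bool => (p.2.1, p.1))).foldl
      (fun d q => d.modify q.1 PySem.Set.empty (fun s => PySem.Set.add s q.2)) PySem.Dict.empty).items := by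
    rw [PySem.Dict.items_eq_map_keys _ hndkA [], PySem.Dict.items_eq_map_keys _ hndkB PySem.Set.empty, hkeys]
    exact List.map_congr_left (fun k _ => by rw [hvals k])
  rw [hitems]
  apply PySem.List.foldl_congr_mem
  intro acc x hx
  rw [← hitems, PySem.Dict.items_eq_map_keys _ hndkA []] at hx
  obtain ⟨k, _, hxk⟩ := List.mem_map.mp hx
  have hx2 : x.2.Nodup := by
    rw [← hxk]
    rw [hvalsA k]
    exact hcolsnd k
  calc pvMergeRow acc x = pvMergeRow acc (x.1, x.2) := rfl
    _ = pvScanRow acc (x.1, x.2) := (scanRow_eq_mergeRow acc x.1 x.2 hx2).symm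
    _ = pvScanRow acc x := rfl

-- ===== VERDICT (by name: the statement is the Claim_ definition above) =====
theorem grid_to_runs_spec : Claim_equal_grid_to_runs := by
  intro grid _ hpre
  exact grid_to_runs_spec' grid hpre
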